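-- pv_equiv track=rewrite | github.com/pypi-data/pypi-mirror-120 | packages/qcri-cyber-commons/qcri_cyber_commons-0.1.1-py3-none-any.whl/commons/pdns/pdns.py | get_first_last_seen_date
-- ===== SOURCE A (Python) =====
-- def get_first_last_seen_date(mappings):
--   first_seen = None
--   last_seen = None
--   if mappings == None:
--    return None
--   for entry in mappings:
--     if first_seen == None:
--       first_seen = entry["time_first"]
--     elif first_seen > entry["time_first"]:
--       first_seen = entry["time_first"]
--     if last_seen == None:
--       last_seen = entry["time_last"]
--     elif last_seen < entry["time_last"]:
--       last_seen = entry["time_last"]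
--   return [first_seen, last_seen]
-- ===== SOURCE B (Python) =====
-- def get_first_last_seen_date(mappings):
--     if mappings == None:
--         return None
--     if not mappings:
--         return [None, None]
--     first_seen = sorted(entry["time_first"] for entry in mappings)[0]
--     last_seen = sorted((entry["time_last"] for entry in mappings), reverse=True)[0]
--     return [first_seen, last_seen]
-- ===== Notes on version B (the rewrite author's own statement) =====
-- stated objective: alternative
-- what changed: Replaced the single running min/max accumulation loop by a sort-then-pick strategy: sort the time_first values ascending and take the head, sort the time_last values descending and take the head (empty input handled by an explicit early return).
import Mathlib
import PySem

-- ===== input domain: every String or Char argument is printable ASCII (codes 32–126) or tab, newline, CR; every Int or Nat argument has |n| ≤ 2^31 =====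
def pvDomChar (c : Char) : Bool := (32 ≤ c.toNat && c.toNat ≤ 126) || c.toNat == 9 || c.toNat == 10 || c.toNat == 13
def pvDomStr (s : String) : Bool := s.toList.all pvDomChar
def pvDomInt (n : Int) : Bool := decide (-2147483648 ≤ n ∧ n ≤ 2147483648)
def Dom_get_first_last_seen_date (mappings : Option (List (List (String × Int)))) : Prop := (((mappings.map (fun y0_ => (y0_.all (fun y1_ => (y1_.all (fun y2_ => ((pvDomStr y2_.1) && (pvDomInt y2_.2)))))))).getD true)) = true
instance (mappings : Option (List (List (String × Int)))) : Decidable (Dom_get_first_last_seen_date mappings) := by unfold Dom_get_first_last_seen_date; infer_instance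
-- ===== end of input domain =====

-- B replaces A's single running min/max loop by sort-then-pick (return value only; alternative strategy, O(n log n)).

-- ===== PORT A =====
-- entry["time_first"]: dict lookup = first match in the association list; getD 0 is only reached
-- outside Pre_ (where Python raises KeyError).
def pvLook (e : List (String × Int)) (k : String) : Option Int := e.lookup k

def pvStepA (st : Option Int × Option Int) (e : List (String × Int)) : Option Int × Option Int :=
  let tf := (pvLook e "time_first").getD 0
  let tl := (pvLook e "time_last").getD 0
  let f := match st.1 with
    | none => some tf
    | some f => if f > tf then some tf else some f
  let l := match st.2 with
    | none => some tl
    | some l => if l < tl then some tl else some l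
  (f, l)

def get_first_last_seen_date (mappings : Option (List (List (String × Int)))) : Option (List (Option Int)) :=
  match mappings with
  | none => none
  | some ms =>
    let st := ms.foldl pvStepA (none, none)
    some [st.1, st.2]

-- ===== PORT B =====
def get_first_last_seen_date_alt (mappings : Option (List (List (String × Int)))) : Option (List (Option Int)) :=
  match mappings with
  | none => none
  | some [] => some [none, none]
  | some ms =>
    let first_seen := (PySem.List.sorted (ms.map (fun e => (pvLook e "time_first").getD 0)) (fun x => x)).head?
    let last_seen := (PySem.List.sorted (ms.map (fun e => (pvLook e "time_last").getD 0)) (fun x => x) true).head?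
    some [first_seen, last_seen]

-- ===== PRECONDITION & SPEC =====
-- Pre_ excludes exactly the inputs where Python A raises KeyError: an entry missing "time_first" or "time_last".
def Pre_get_first_last_seen_date (mappings : Option (List (List (String × Int)))) : Prop :=
  (mappings.map (fun ms => ms.all (fun e => (pvLook e "time_first").isSome && (pvLook e "time_last").isSome))).getD true = true
instance (mappings : Option (List (List (String × Int)))) : Decidable (Pre_get_first_last_seen_date mappings) := by unfold Pre_get_first_last_seen_date; infer_instance

def pvWitness_get_first_last_seen_date : (Option (List (List (String × Int)))) :=
  some [[("time_first", (3 : Int)), ("time_last", 5)], [("time_first", 1), ("time_last", 9)]]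

def Spec_get_first_last_seen_date (mappings : Option (List (List (String × Int)))) (out : Option (List (Option Int))) : Prop := out = get_first_last_seen_date_alt mappings
instance (mappings : Option (List (List (String × Int)))) (out : Option (List (Option Int))) : Decidable (Spec_get_first_last_seen_date mappings out) := by unfold Spec_get_first_last_seen_date; infer_instance

-- ===== CLAIM (what is proved, stated in full; the proofs are below) =====
def Claim_equal_get_first_last_seen_date : Prop := ∀ (mappings : Option (List (List (String × Int)))), Dom_get_first_last_seen_date mappings → Pre_get_first_last_seen_date mappings → Spec_get_first_last_seen_date mappings (get_first_last_seen_date mappings)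

-- ===== LEMMAS AND PROOFS =====

-- A's loop from a (some, some) state computes the running min/max of the looked-up values.
theorem pvStepA_loop (ms : List (List (String × Int))) (f l : Int) :
    ms.foldl pvStepA (some f, some l) =
      (some ((ms.map (fun e => (pvLook e "time_first").getD 0)).foldl min f),
       some ((ms.map (fun e => (pvLook e "time_last").getD 0)).foldl max l)) := by
  induction ms generalizing f l with
  | nil => simp
  | cons e t ih =>
    have e1 : ∀ (a b : Int), (if a > b then some b else some a) = some (min a b) := by
      intro a b; split_ifs with h <;> exact congrArg some (by omega)
    have e2 : ∀ (a b : Int), (if a < b then some b else some a) = some (max a b) := by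
      intro a b; split_ifs with h <;> exact congrArg some (by omega)
    simp only [List.foldl_cons, List.map_cons, pvStepA, e1, e2, ih]

-- head of sorted (v :: vt) is the running minimum.
theorem head_sorted_min (v : Int) (vt : List Int) :
    (PySem.List.sorted (v :: vt) (fun x => x)).head? = some (vt.foldl min v) := by
  rcases hs : PySem.List.sorted (v :: vt) (fun x => x) with _ | ⟨m, rest⟩
  · exact absurd (((PySem.List.sorted_eq_nil_iff _ _ _).mp hs)) (by simp)
  · have hmem : m ∈ v :: vt := (PySem.List.mem_sorted _ _ _ _).mp (hs ▸ List.mem_cons_self)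
    have hle : ∀ y ∈ v :: vt, m ≤ y := PySem.List.key_head_sorted_le _ _ hs
    have hfold := PySem.List.foldl_min_le vt v
    have hmem' : vt.foldl min v = v ∨ vt.foldl min v ∈ vt := PySem.List.foldl_min_mem vt v
    have h1 : m ≤ vt.foldl min v := by
      rcases hmem' with h | h
      · rw [h]; exact hle v List.mem_cons_self
      · exact hle _ (List.mem_cons_of_mem _ h)
    have h2 : vt.foldl min v ≤ m := by
      rcases List.mem_cons.mp hmem with h | h
      · exact h ▸ hfold.1
      · exact hfold.2 m h
    simp [le_antisymm h1 h2]

-- head of reverse-sorted (v :: vt) is the running maximum.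
theorem head_sorted_rev_max (v : Int) (vt : List Int) :
    (PySem.List.sorted (v :: vt) (fun x => x) true).head? = some (vt.foldl max v) := by
  rcases hs : PySem.List.sorted (v :: vt) (fun x => x) true with _ | ⟨m, rest⟩
  · exact absurd (((PySem.List.sorted_eq_nil_iff _ _ _).mp hs)) (by simp)
  · have hmem : m ∈ v :: vt := (PySem.List.mem_sorted _ _ _ _).mp (hs ▸ List.mem_cons_self)
    have hge : ∀ y ∈ v :: vt, y ≤ m := PySem.List.key_head_sorted_rev_ge _ _ hs
    have hfold := PySem.List.le_foldl_max vt v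
    have hmem' : vt.foldl max v = v ∨ vt.foldl max v ∈ vt := PySem.List.foldl_max_mem vt v
    have h1 : vt.foldl max v ≤ m := by
      rcases hmem' with h | h
      · rw [h]; exact hge v List.mem_cons_self
      · exact hge _ (List.mem_cons_of_mem _ h)
    have h2 : m ≤ vt.foldl max v := by
      rcases List.mem_cons.mp hmem with h | h
      · exact h ▸ hfold.1
      · exact hfold.2 m h
    simp [le_antisymm h2 h1]

theorem get_first_last_seen_date_eq (mappings : Option (List (List (String × Int)))) :
    get_first_last_seen_date mappings = get_first_last_seen_date_alt mappings := by
  cases mappings with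
  | none => rfl
  | some ms =>
    cases ms with
    | nil => rfl
    | cons e t =>
      simp only [get_first_last_seen_date, get_first_last_seen_date_alt,
        List.foldl_cons, List.map_cons, pvStepA, head_sorted_min, head_sorted_rev_max]
      rw [pvStepA_loop]

-- ===== VERDICT (by name: the statement is the Claim_ definition above) =====
theorem get_first_last_seen_date_spec : Claim_equal_get_first_last_seen_date := by
  intro m _ _
  exact get_first_last_seen_date_eq m
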